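-- pv_equiv track=rewrite | github.com/KonoNeko/CatSpy | backend/utils.py | detect_brand_keyword_abuse
-- ===== SOURCE A (Python) =====
-- LEGITIMATE_BRANDS = {
--     'microsoft': ['microsoft.com', 'outlook.com', 'hotmail.com', 'live.com', 'office.com', 'azure.com', 'xbox.com', 'msn.com'],
--     'google': ['google.com', 'gmail.com', 'youtube.com', 'google.co.uk', 'google.ca', 'google.com.au', 'goo.gl'],
--     'amazon': ['amazon.com', 'amazon.co.uk', 'amazon.ca', 'amazon.de', 'amazon.fr', 'amazon.in', 'amazon.jp', 'aws.amazon.com'],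
--     'apple': ['apple.com', 'icloud.com', 'itunes.com', 'me.com', 'mac.com'],
--     'facebook': ['facebook.com', 'fb.com', 'messenger.com', 'fbcdn.net'],
--     'paypal': ['paypal.com', 'paypal.co.uk', 'paypal.ca', 'paypal.de', 'paypal.fr'],
--     'netflix': ['netflix.com'],
--     'linkedin': ['linkedin.com'],
--     'twitter': ['twitter.com', 'x.com', 't.co'],
--     'instagram': ['instagram.com'],
--     'whatsapp': ['whatsapp.com'],
--     'adobe': ['adobe.com'],
--     'dropbox': ['dropbox.com'],
--     'zoom': ['zoom.us'],
--     'spotify': ['spotify.com'],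
-- }
--
-- SECURITY_KEYWORDS = [
--     'login', 'signin', 'sign-in', 'account', 'verify', 'verification',
--     'secure', 'security', 'update', 'confirm', 'authenticate', 'auth',
--     'password', 'reset', 'recovery', 'support', 'help', 'service',
--     'notification', 'alert', 'warning', 'suspended', 'locked'
-- ]
--
-- def detect_brand_keyword_abuse(domain):
--     """
--     Detect combinations of brand-like names with security keywords.
--     Example: microsoft-login-secure.com, paypal-verify.com
--     """
--     domain_lower = domain.lower()
--     detected = []
--
--     for brand in LEGITIMATE_BRANDS.keys():
--         if brand in domain_lower:
--             for keyword in SECURITY_KEYWORDS: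
--                 if keyword in domain_lower:
--                     detected.append({
--                         'brand': brand,
--                         'keyword': keyword,
--                         'pattern': f"{brand}...{keyword}"
--                     })
--
--     return detected if detected else None
-- ===== SOURCE B (Python) =====
-- LEGITIMATE_BRANDS = {
--     'microsoft': ['microsoft.com', 'outlook.com', 'hotmail.com', 'live.com', 'office.com', 'azure.com', 'xbox.com', 'msn.com'],
--     'google': ['google.com', 'gmail.com', 'youtube.com', 'google.co.uk', 'google.ca', 'google.com.au', 'goo.gl'],
--     'amazon': ['amazon.com', 'amazon.co.uk', 'amazon.ca', 'amazon.de', 'amazon.fr', 'amazon.in', 'amazon.jp', 'aws.amazon.com'],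
--     'apple': ['apple.com', 'icloud.com', 'itunes.com', 'me.com', 'mac.com'],
--     'facebook': ['facebook.com', 'fb.com', 'messenger.com', 'fbcdn.net'],
--     'paypal': ['paypal.com', 'paypal.co.uk', 'paypal.ca', 'paypal.de', 'paypal.fr'],
--     'netflix': ['netflix.com'],
--     'linkedin': ['linkedin.com'],
--     'twitter': ['twitter.com', 'x.com', 't.co'],
--     'instagram': ['instagram.com'],
--     'whatsapp': ['whatsapp.com'],
--     'adobe': ['adobe.com'],
--     'dropbox': ['dropbox.com'],
--     'zoom': ['zoom.us'],
--     'spotify': ['spotify.com'],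
-- }
--
-- SECURITY_KEYWORDS = [
--     'login', 'signin', 'sign-in', 'account', 'verify', 'verification',
--     'secure', 'security', 'update', 'confirm', 'authenticate', 'auth',
--     'password', 'reset', 'recovery', 'support', 'help', 'service',
--     'notification', 'alert', 'warning', 'suspended', 'locked'
-- ]
--
-- def detect_brand_keyword_abuse(domain):
--     """Single left-to-right scan over the domain: at each character position mark
--     every brand / keyword that starts there (a one-pass multi-pattern matcher),
--     then combine the matched sets in canonical dictionary/list order."""
--     domain_lower = domain.lower()
--     found_brands, found_keywords = set(), set()
--     for i in range(len(domain_lower)):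
--         for brand in LEGITIMATE_BRANDS:
--             if brand not in found_brands and domain_lower.startswith(brand, i):
--                 found_brands.add(brand)
--         for keyword in SECURITY_KEYWORDS:
--             if keyword not in found_keywords and domain_lower.startswith(keyword, i):
--                 found_keywords.add(keyword)
--     detected = [{'brand': b, 'keyword': k, 'pattern': f"{b}...{k}"}
--                 for b in LEGITIMATE_BRANDS if b in found_brands
--                 for k in SECURITY_KEYWORDS if k in found_keywords]
--     return detected or None
-- ===== Notes on version B (the rewrite author's own statement) =====
-- stated objective: alternative
-- what changed: Replaces A's per-pattern substring searches (re-scanning the whole domain for every keyword under every matching brand) with a single left-to-right scan of the domain that, at each character position, marks every brand/keyword starting there (a one-pass multi-pattern matcher over two found-sets), then combines the two matched sets in canonical order.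
import Mathlib
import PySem

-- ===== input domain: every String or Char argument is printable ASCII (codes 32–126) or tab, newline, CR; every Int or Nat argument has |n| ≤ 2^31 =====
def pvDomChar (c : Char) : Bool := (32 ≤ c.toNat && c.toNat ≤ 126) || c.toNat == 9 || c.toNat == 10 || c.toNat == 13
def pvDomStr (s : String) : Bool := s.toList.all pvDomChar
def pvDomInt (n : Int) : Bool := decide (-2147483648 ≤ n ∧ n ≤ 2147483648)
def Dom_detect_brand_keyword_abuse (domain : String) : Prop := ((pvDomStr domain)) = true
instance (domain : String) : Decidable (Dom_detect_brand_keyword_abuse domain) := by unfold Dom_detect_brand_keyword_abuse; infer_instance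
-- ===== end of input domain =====

-- B replaces A's per-pattern substring re-scanning with a single left-to-right scan of the domain that marks every brand/keyword starting at each position, then combines the two matched sets; objective: alternative (same output).


-- module constants shared by both versions (LEGITIMATE_BRANDS.keys() in insertion order, SECURITY_KEYWORDS)
def pvBrands : List String :=
  ["microsoft", "google", "amazon", "apple", "facebook", "paypal", "netflix",
   "linkedin", "twitter", "instagram", "whatsapp", "adobe", "dropbox", "zoom", "spotify"]

def pvKeywords : List String :=
  ["login", "signin", "sign-in", "account", "verify", "verification",
   "secure", "security", "update", "confirm", "authenticate", "auth",
   "password", "reset", "recovery", "support", "help", "service",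
   "notification", "alert", "warning", "suspended", "locked"]

-- the appended dict {'brand': b, 'keyword': k, 'pattern': f"{b}...{k}"}
def pvEntry (b k : String) : List (String × String) :=
  [("brand", b), ("keyword", k), ("pattern", b ++ "..." ++ k)]

-- ===== PORT A =====
def detect_brand_keyword_abuse (domain : String) : Option (List (List (String × String))) :=
  let domain_lower := PySem.Str.lower domain
  let detected :=
    pvBrands.foldl
      (fun acc brand =>
        if PySem.Str.isIn brand domain_lower then
          pvKeywords.foldl
            (fun acc2 keyword =>
              if PySem.Str.isIn keyword domain_lower then acc2 ++ [pvEntry brand keyword]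
              else acc2)
            acc
        else acc)
      []
  if detected ≠ [] then some detected else none

-- ===== PORT B =====
-- domain_lower.startswith(p, i) for 0 ≤ i: exact (Python checks p against the text starting at offset i)
def pvStartsAt (dl : List Char) (p : String) (i : Int) : Bool :=
  p.toList.isPrefixOf (dl.drop i.toNat)

-- 'for pat in pats: if pat not in found and domain_lower.startswith(pat, i): found.add(pat)'
def pvMarkAt (dl : List Char) (i : Int) (pats : List String) (found : PySem.Set String) : PySem.Set String :=
  pats.foldl
    (fun s pat =>
      if (!(PySem.Set.contains s pat)) && pvStartsAt dl pat i then PySem.Set.add s pat else s)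
    found

def detect_brand_keyword_abuse_alt (domain : String) : Option (List (List (String × String))) :=
  let domain_lower := PySem.Str.lower domain
  let dl := domain_lower.toList
  -- one pass over the character positions, marking every brand / keyword that starts there
  let found :=
    (PySem.List.pyRange 0 (PySem.Str.len domain_lower) 1).foldl
      (fun (st : PySem.Set String × PySem.Set String) i =>
        (pvMarkAt dl i pvBrands st.1, pvMarkAt dl i pvKeywords st.2))
      (PySem.Set.empty, PySem.Set.empty)
  -- combine the matched sets in canonical order (the list comprehension)
  let detected :=
    pvBrands.foldl
      (fun acc b =>
        if PySem.Set.contains found.1 b then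
          pvKeywords.foldl
            (fun acc2 k =>
              if PySem.Set.contains found.2 k then acc2 ++ [pvEntry b k] else acc2)
            acc
        else acc)
      []
  if detected ≠ [] then some detected else none

-- ===== PRECONDITION & SPEC =====
def Spec_detect_brand_keyword_abuse (domain : String) (out : Option (List (List (String × String)))) : Prop := out = detect_brand_keyword_abuse_alt domain
instance (domain : String) (out : Option (List (List (String × String)))) : Decidable (Spec_detect_brand_keyword_abuse domain out) := by unfold Spec_detect_brand_keyword_abuse; infer_instance

-- ===== CLAIM (what is proved, stated in full; the proofs are below) =====
def Claim_equal_detect_brand_keyword_abuse : Prop := ∀ (domain : String), Dom_detect_brand_keyword_abuse domain → Spec_detect_brand_keyword_abuse domain (detect_brand_keyword_abuse domain)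

-- ===== LEMMAS AND PROOFS =====

-- a nonempty pattern is an infix of l iff it is a prefix of some proper-range drop of l
theorem pv_infix_iff_drop (p l : List Char) (hp : p ≠ []) :
    p <:+: l ↔ ∃ i : Nat, i < l.length ∧ p <+: l.drop i := by
  constructor
  · rintro ⟨s, t, rfl⟩
    have hplen : 0 < p.length := List.length_pos_iff.mpr hp
    refine ⟨s.length, ?_, ?_⟩
    · simp [List.length_append]; omega
    · simp [List.prefix_append]
  · rintro ⟨i, _, hpre⟩
    exact hpre.isInfix.trans (List.drop_suffix i l).isInfix

-- the 'not yet found' guard does not change the set: adding an element already present is a no-op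
theorem pv_markAt_step (dl : List Char) (i : Int) (s : PySem.Set String) (b : String) :
    (if (!(PySem.Set.contains s b)) && pvStartsAt dl b i then PySem.Set.add s b else s)
      = (if pvStartsAt dl b i then PySem.Set.add s b else s) := by
  cases hcb : PySem.Set.contains s b with
  | false => simp
  | true => simp [PySem.Set.add_of_mem ((PySem.Set.contains_iff s b).mp hcb)]

-- membership after marking all patterns at one position
theorem pv_mem_markAt (dl : List Char) (i : Int) (pats : List String)
    (s : PySem.Set String) (x : String) :
    x ∈ pvMarkAt dl i pats s ↔ x ∈ s ∨ (x ∈ pats ∧ pvStartsAt dl x i = true) := by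
  unfold pvMarkAt
  induction pats generalizing s with
  | nil => simp
  | cons b bs ih =>
    rw [List.foldl_cons, pv_markAt_step]
    by_cases hs : pvStartsAt dl b i = true
    · rw [if_pos hs, ih]
      simp only [PySem.Set.mem_add, List.mem_cons]
      constructor
      · rintro ((h | rfl) | ⟨hm, hst⟩)
        · exact Or.inl h
        · exact Or.inr ⟨Or.inl rfl, hs⟩
        · exact Or.inr ⟨Or.inr hm, hst⟩
      · rintro (h | ⟨(rfl | hm), hst⟩)
        · exact Or.inl (Or.inl h)
        · exact Or.inl (Or.inr rfl)
        · exact Or.inr ⟨hm, hst⟩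
    · rw [if_neg hs, ih]
      simp only [List.mem_cons]
      constructor
      · rintro (h | ⟨hm, hst⟩)
        · exact Or.inl h
        · exact Or.inr ⟨Or.inr hm, hst⟩
      · rintro (h | ⟨(rfl | hm), hst⟩)
        · exact Or.inl h
        · exact absurd hst hs
        · exact Or.inr ⟨hm, hst⟩

-- membership after the whole scan over a list of positions
theorem pv_mem_scan (dl : List Char) (pats : List String) (idxs : List Int)
    (s : PySem.Set String) (x : String) :
    x ∈ idxs.foldl (fun s i => pvMarkAt dl i pats s) s ↔
      x ∈ s ∨ (x ∈ pats ∧ ∃ i ∈ idxs, pvStartsAt dl x i = true) := by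
  induction idxs generalizing s with
  | nil => simp
  | cons i is ih =>
    rw [List.foldl_cons, ih, pv_mem_markAt]
    constructor
    · rintro ((h | ⟨hm, hst⟩) | ⟨hm, j, hj, hst⟩)
      · exact Or.inl h
      · exact Or.inr ⟨hm, i, List.mem_cons_self, hst⟩
      · exact Or.inr ⟨hm, j, List.mem_cons_of_mem _ hj, hst⟩
    · rintro (h | ⟨hm, j, hj, hst⟩)
      · exact Or.inl (Or.inl h)
      · rcases List.mem_cons.mp hj with rfl | hj'
        · exact Or.inl (Or.inr ⟨hm, hst⟩)
        · exact Or.inr ⟨hm, j, hj', hst⟩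

-- a nonempty pattern starts at some scanned position iff it is a substring
theorem pv_exists_startsAt_iff (dl : List Char) (p : String) (hp : p.toList ≠ []) :
    (∃ i ∈ PySem.List.pyRange 0 (dl.length : Int) 1, pvStartsAt dl p i = true) ↔
      PySem.Chars.isIn p.toList dl = true := by
  rw [PySem.Chars.isIn_iff_infix, pv_infix_iff_drop _ _ hp]
  constructor
  · rintro ⟨i, hmem, hst⟩
    have hb := (PySem.List.mem_pyRange_one).mp hmem
    refine ⟨i.toNat, by omega, ?_⟩
    simpa [pvStartsAt, List.isPrefixOf_iff_prefix] using hst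
  · rintro ⟨i, hlt, hpre⟩
    refine ⟨(i : Int), (PySem.List.mem_pyRange_one).mpr ⟨Int.natCast_nonneg i, by exact_mod_cast hlt⟩, ?_⟩
    simpa [pvStartsAt, List.isPrefixOf_iff_prefix] using hpre

-- the scanned set answers membership exactly like Python's 'pat in domain_lower'
theorem pv_scan_contains (dl : List Char) (pats : List String)
    (hne : ∀ p ∈ pats, p.toList ≠ []) (x : String) (hx : x ∈ pats) :
    PySem.Set.contains
      ((PySem.List.pyRange 0 (dl.length : Int) 1).foldl
        (fun s i => pvMarkAt dl i pats s) PySem.Set.empty) x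
      = PySem.Chars.isIn x.toList dl := by
  rcases hb : PySem.Chars.isIn x.toList dl with _ | _
  · rw [Bool.eq_false_iff, Ne, PySem.Set.contains_iff, pv_mem_scan]
    rintro (h | ⟨-, i, hi, hst⟩)
    · simp [PySem.Set.empty] at h
    · exact absurd ((pv_exists_startsAt_iff dl x (hne x hx)).mp ⟨i, hi, hst⟩)
        (by simp [hb])
  · rw [PySem.Set.contains_iff, pv_mem_scan]
    rcases (pv_exists_startsAt_iff dl x (hne x hx)).mpr hb with ⟨i, hi, hst⟩
    exact Or.inr ⟨hx, i, hi, hst⟩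

-- combining phase: replacing set-membership tests by the substring tests they equal
theorem pv_combine_eq (dlow : String) (fb fk : PySem.Set String)
    (hb : ∀ b ∈ pvBrands, PySem.Set.contains fb b = PySem.Str.isIn b dlow)
    (hk : ∀ k ∈ pvKeywords, PySem.Set.contains fk k = PySem.Str.isIn k dlow) :
    pvBrands.foldl
      (fun acc brand =>
        if PySem.Str.isIn brand dlow then
          pvKeywords.foldl
            (fun acc2 keyword =>
              if PySem.Str.isIn keyword dlow then acc2 ++ [pvEntry brand keyword]
              else acc2)
            acc
        else acc)
      ([] : List (List (String × String)))
    = pvBrands.foldl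
      (fun acc b =>
        if PySem.Set.contains fb b then
          pvKeywords.foldl
            (fun acc2 k =>
              if PySem.Set.contains fk k then acc2 ++ [pvEntry b k] else acc2)
            acc
        else acc)
      ([] : List (List (String × String))) := by
  apply PySem.List.foldl_congr_mem
  intro acc b hbb
  rw [hb b hbb]
  by_cases hin : PySem.Str.isIn b dlow = true
  · rw [if_pos hin, if_pos hin]
    apply PySem.List.foldl_congr_mem
    intro acc2 k hkk
    rw [hk k hkk]
  · rw [if_neg hin, if_neg hin]

-- ===== VERDICT (by name: the statement is the Claim_ definition above) =====
set_option maxHeartbeats 1000000 in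
theorem detect_brand_keyword_abuse_spec : Claim_equal_detect_brand_keyword_abuse := by
  intro domain _
  show detect_brand_keyword_abuse domain = detect_brand_keyword_abuse_alt domain
  simp only [detect_brand_keyword_abuse, detect_brand_keyword_abuse_alt]
  rw [PySem.List.foldl_prod_mk (f := fun s i => pvMarkAt (PySem.Str.lower domain).toList i pvBrands s)
        (g := fun s i => pvMarkAt (PySem.Str.lower domain).toList i pvKeywords s)]
  have hlen : PySem.Str.len (PySem.Str.lower domain) = (((PySem.Str.lower domain).toList.length : Int)) := by
    simp
  rw [hlen]
  dsimp only
  have hd := pv_combine_eq (PySem.Str.lower domain)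
      ((PySem.List.pyRange 0 (((PySem.Str.lower domain).toList.length : Int)) 1).foldl
        (fun s i => pvMarkAt (PySem.Str.lower domain).toList i pvBrands s) PySem.Set.empty)
      ((PySem.List.pyRange 0 (((PySem.Str.lower domain).toList.length : Int)) 1).foldl
        (fun s i => pvMarkAt (PySem.Str.lower domain).toList i pvKeywords s) PySem.Set.empty)
      (fun b hb => by rw [pv_scan_contains _ _ (by decide) b hb]; simp)
      (fun k hk => by rw [pv_scan_contains _ _ (by decide) k hk]; simp)
  rw [hd]
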